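-- pv_equiv track=rewrite | github.com/hoangtrungkien2109/ViSTAR_NCKH | src/ai/services/frame2video_services/convert_service.py | defineSE
-- ===== SOURCE A (Python) =====
-- def defineSE(arr):
--     s, e = 0, len(arr) - 1
--     for i in range(len(arr) - 1):
--         if arr[i] != arr[i + 1]:
--             s = i + 1
--             break
--
--     for i in range(len(arr) - 1, 0, -1):
--         if arr[i] != arr[i - 1]:
--             e = i
--             break
--     return s, e
-- ===== SOURCE B (Python) =====
-- def defineSE(arr):
--     n = len(arr)
--     t = [i for i in range(n - 1) if arr[i] != arr[i + 1]]
--     s = t[0] + 1 if t else 0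
--     e = t[-1] + 1 if t else n - 1
--     return s, e
-- ===== Notes on version B (the rewrite author's own statement) =====
-- stated objective: simpler
-- what changed: Replaces A's two early-breaking directional scans by one comprehension collecting all transition indices, with s/e read off the first and last element of that list.
import Mathlib
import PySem

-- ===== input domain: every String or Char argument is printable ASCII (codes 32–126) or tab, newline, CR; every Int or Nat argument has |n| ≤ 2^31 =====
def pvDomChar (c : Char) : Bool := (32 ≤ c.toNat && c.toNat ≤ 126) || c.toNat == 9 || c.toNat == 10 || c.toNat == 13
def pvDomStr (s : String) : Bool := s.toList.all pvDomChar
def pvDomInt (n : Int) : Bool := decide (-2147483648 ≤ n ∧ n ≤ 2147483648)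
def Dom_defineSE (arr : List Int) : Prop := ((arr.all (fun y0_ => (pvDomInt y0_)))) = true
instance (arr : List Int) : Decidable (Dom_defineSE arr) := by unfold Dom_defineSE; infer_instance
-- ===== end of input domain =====

-- B replaces A's two early-breaking scans by one transition-index comprehension read at both ends (objective: simpler).

-- ===== PORT A =====
-- first for-loop with break: returns i+1 at the first transition, else the initial s = 0
def pvLoopS (arr : List Int) : List Int → Int
  | [] => 0
  | i :: rest =>
      if PySem.List.pyGetD arr i 0 != PySem.List.pyGetD arr (i + 1) 0 then i + 1
      else pvLoopS arr rest

-- second for-loop with break: returns i at the first transition seen from the right, else e0 = len-1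
def pvLoopE (arr : List Int) (e0 : Int) : List Int → Int
  | [] => e0
  | i :: rest =>
      if PySem.List.pyGetD arr i 0 != PySem.List.pyGetD arr (i - 1) 0 then i
      else pvLoopE arr e0 rest

def defineSE (arr : List Int) : Int × Int :=
  let n : Int := arr.length
  let s := pvLoopS arr (PySem.List.pyRange 0 (n - 1) 1)
  let e := pvLoopE arr (n - 1) (PySem.List.pyRange (n - 1) 0 (-1))
  (s, e)

-- ===== PORT B =====
def defineSE_alt (arr : List Int) : Int × Int :=
  let n : Int := arr.length
  let t := (PySem.List.pyRange 0 (n - 1) 1).filter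
      (fun i => PySem.List.pyGetD arr i 0 != PySem.List.pyGetD arr (i + 1) 0)
  let s := match t.head? with | some i => i + 1 | none => 0
  let e := match t.getLast? with | some i => i + 1 | none => n - 1
  (s, e)

-- ===== PRECONDITION & SPEC =====
def Spec_defineSE (arr : List Int) (out : Int × Int) : Prop := out = defineSE_alt arr
instance (arr : List Int) (out : Int × Int) : Decidable (Spec_defineSE arr out) := by unfold Spec_defineSE; infer_instance

-- ===== CLAIM (what is proved, stated in full; the proofs are below) =====
def Claim_equal_defineSE : Prop := ∀ (arr : List Int), Dom_defineSE arr → Spec_defineSE arr (defineSE arr)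

-- ===== LEMMAS AND PROOFS =====

-- A's forward break-loop is head? of the filtered list
theorem pvLoopS_eq_filter (arr : List Int) (l : List Int) :
    pvLoopS arr l =
      match (l.filter (fun i => PySem.List.pyGetD arr i 0 != PySem.List.pyGetD arr (i + 1) 0)).head? with
      | some i => i + 1 | none => 0 := by
  induction l with
  | nil => simp [pvLoopS]
  | cons i rest ih =>
      by_cases h : (PySem.List.pyGetD arr i 0 != PySem.List.pyGetD arr (i + 1) 0) = true
      · simp [pvLoopS, h]
      · simp [pvLoopS, h, ih]

-- A's backward break-loop is head? of the filtered list
theorem pvLoopE_eq_filter (arr : List Int) (e0 : Int) (l : List Int) :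
    pvLoopE arr e0 l =
      match (l.filter (fun i => PySem.List.pyGetD arr i 0 != PySem.List.pyGetD arr (i - 1) 0)).head? with
      | some i => i | none => e0 := by
  induction l with
  | nil => simp [pvLoopE]
  | cons i rest ih =>
      by_cases h : (PySem.List.pyGetD arr i 0 != PySem.List.pyGetD arr (i - 1) 0) = true
      · simp [pvLoopE, h]
      · simp [pvLoopE, h, ih]

-- the descending range on which A's second loop runs, shifted: map (+1) of the ascending transition range, reversed
theorem pvRange_desc_eq (n : Int) :
    PySem.List.pyRange (n - 1) 0 (-1) = ((PySem.List.pyRange 0 (n - 1) 1).map (fun i => i + 1)).reverse := by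
  rw [PySem.List.pyRange_neg_one_eq_reverse]
  have h1 : (0 : Int) + 1 = 1 := by ring
  have h2 : n - 1 + 1 = n := by ring
  rw [h1, h2, PySem.List.pyRange_one, PySem.List.pyRange_one, List.map_map]
  simp only [sub_zero]
  congr 1
  apply List.map_congr_left
  intro k _
  simp [Function.comp]
  ring

theorem defineSE_eq_alt (arr : List Int) : defineSE arr = defineSE_alt arr := by
  unfold defineSE defineSE_alt
  simp only [pvLoopS_eq_filter, pvLoopE_eq_filter, pvRange_desc_eq]
  rw [List.filter_reverse, List.head?_reverse, List.filter_map, List.getLast?_map]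
  have hpred : ((fun i => PySem.List.pyGetD arr i 0 != PySem.List.pyGetD arr (i - 1) 0) ∘ (fun i => i + 1))
      = (fun i => PySem.List.pyGetD arr i 0 != PySem.List.pyGetD arr (i + 1) 0) := by
    funext i
    simp only [Function.comp, add_sub_cancel_right]
    exact bne_comm ..
  rw [hpred]
  cases ((PySem.List.pyRange 0 ((arr.length : Int) - 1) 1).filter
      (fun i => PySem.List.pyGetD arr i 0 != PySem.List.pyGetD arr (i + 1) 0)).getLast? <;> simp

-- ===== VERDICT (by name: the statement is the Claim_ definition above) =====
theorem defineSE_spec : Claim_equal_defineSE := by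
  intro arr _
  unfold Spec_defineSE
  exact defineSE_eq_alt arr
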